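-- pv_equiv track=rewrite | github.com/szymonrykala/Periodicity-Research-Tool | sprt/analysis/analysis.py | __count_occurrences_offsets
-- ===== SOURCE A (Python) =====
-- from copy import copy
--
-- def __count_occurrences_offsets(indexes: list[int]) -> list[int]:
--     """
--     indexes = [3, 5, 6 ,9 ,10]
--     out = [2, 1, 3, 1]
--     """
--     if not indexes:
--         return []
--
--     indexes_cp = copy(indexes)
--
--     def _job():
--         last = indexes_cp.pop(0)
--         for i in indexes_cp:
--             yield i - last
--             last = i
--
--     return list(_job())
-- ===== SOURCE B (Python) =====
-- def __count_occurrences_offsets(indexes: list[int]) -> list[int]: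
--     return [b - a for a, b in zip(indexes, indexes[1:])]
-- ===== Notes on version B (the rewrite author's own statement) =====
-- stated objective: idiomatic
-- what changed: Replaces the guard, list copy, pop and stateful generator carrying 'last' with a single comprehension pairing each element with its successor via zip over two offset views; empty/singleton cases fall out of zip stopping early.
import Mathlib
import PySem

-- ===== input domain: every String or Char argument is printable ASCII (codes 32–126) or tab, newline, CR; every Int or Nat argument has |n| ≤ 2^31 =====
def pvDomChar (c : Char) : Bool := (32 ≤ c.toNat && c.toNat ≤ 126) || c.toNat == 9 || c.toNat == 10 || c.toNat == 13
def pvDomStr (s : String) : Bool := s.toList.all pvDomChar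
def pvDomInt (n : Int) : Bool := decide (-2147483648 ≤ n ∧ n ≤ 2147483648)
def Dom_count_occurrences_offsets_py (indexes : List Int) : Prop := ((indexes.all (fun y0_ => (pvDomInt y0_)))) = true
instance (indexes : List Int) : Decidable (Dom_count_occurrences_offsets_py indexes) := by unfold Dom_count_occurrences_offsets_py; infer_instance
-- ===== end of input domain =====

-- B replaces A's guard/copy/pop/stateful generator by zipping the list with its tail (idiomatic, same cost).


-- ===== PORT A =====
-- Port of A: empty guard, pop first element as 'last', loop yielding i - last and updating last.
def count_occurrences_offsets_py (indexes : List Int) : List Int :=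
  match indexes with
  | [] => []
  | last :: rest =>
      (rest.foldl (fun (st : List Int × Int) i => (st.1 ++ [i - st.2], i)) ([], last)).1

-- ===== PORT B =====
-- Port of B: pair each element with its successor (zip of the list with its tail, = indexes[1:]).
def count_occurrences_offsets_py_alt (indexes : List Int) : List Int :=
  (indexes.zip indexes.tail).map (fun p => p.2 - p.1)

-- ===== PRECONDITION & SPEC =====
def Spec_count_occurrences_offsets_py (indexes : List Int) (out : List Int) : Prop := out = count_occurrences_offsets_py_alt indexes
instance (indexes : List Int) (out : List Int) : Decidable (Spec_count_occurrences_offsets_py indexes out) := by unfold Spec_count_occurrences_offsets_py; infer_instance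

-- ===== CLAIM (what is proved, stated in full; the proofs are below) =====
def Claim_equal_count_occurrences_offsets_py : Prop := ∀ (indexes : List Int), Dom_count_occurrences_offsets_py indexes → Spec_count_occurrences_offsets_py indexes (count_occurrences_offsets_py indexes)

-- ===== LEMMAS AND PROOFS =====
theorem pv_fold_eq (rest : List Int) : ∀ (last : Int) (acc : List Int),
    (rest.foldl (fun (st : List Int × Int) i => (st.1 ++ [i - st.2], i)) (acc, last)).1
      = acc ++ ((last :: rest).zip rest).map (fun p => p.2 - p.1) := by
  induction rest with
  | nil => intro last acc; simp
  | cons x xs ih =>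
      intro last acc
      simp [List.foldl, ih x (acc ++ [x - last]), List.zip_cons_cons]

-- ===== VERDICT (by name: the statement is the Claim_ definition above) =====
theorem count_occurrences_offsets_py_spec : Claim_equal_count_occurrences_offsets_py := by
  intro indexes _
  unfold Spec_count_occurrences_offsets_py count_occurrences_offsets_py count_occurrences_offsets_py_alt
  match indexes with
  | [] => rfl
  | last :: rest => simpa using pv_fold_eq rest last []
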